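-- pv_equiv track=rewrite | github.com/rancher/rancher | env/lib/python3.8/site-packages/netaddr/fbsocket.py | _compact_ipv6_tokens
-- ===== SOURCE A (Python) =====
-- def _compact_ipv6_tokens(tokens):
--     new_tokens = []
--
--     positions = []
--     start_index = None
--     num_tokens = 0
--
--     #   Discover all runs of zeros.
--     for idx, token in enumerate(tokens):
--         if token == '0':
--             if start_index is None:
--                 start_index = idx
--             num_tokens += 1
--         else:
--             if num_tokens > 1:
--                 positions.append((num_tokens, start_index))
--             start_index = None
--             num_tokens = 0
--
--         new_tokens.append(token)
--
--     #   Store any position not saved before loop exit.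
--     if num_tokens > 1:
--         positions.append((num_tokens, start_index))
--
--     #   Replace first longest run with an empty string.
--     if len(positions) != 0:
--         #   Locate longest, left-most run of zeros.
--         positions.sort(key=lambda x: x[1])
--         best_position = positions[0]
--         for position in positions:
--             if position[0] > best_position[0]:
--                 best_position = position
--         #   Replace chosen zero run.
--         (length, start_idx) = best_position
--         new_tokens = new_tokens[0:start_idx] + [''] + new_tokens[start_idx + length:]
--
--         #   Add start and end blanks so join creates '::'.
--         if new_tokens[0] == '':
--             new_tokens.insert(0, '')
--
--         if new_tokens[-1] == '':
--             new_tokens.append('')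
--
--     return new_tokens
-- ===== SOURCE B (Python) =====
-- def _compact_ipv6_tokens(tokens):
--     #   One pass: track the current zero-run and the best (longest, leftmost) run.
--     best_len = best_start = cur_len = cur_start = 0
--     for idx, token in enumerate(tokens):
--         if token == '0':
--             if cur_len == 0:
--                 cur_start = idx
--             cur_len += 1
--         else:
--             if cur_len > 1 and cur_len > best_len:
--                 best_len, best_start = cur_len, cur_start
--             cur_len = 0
--     if cur_len > 1 and cur_len > best_len:
--         best_len, best_start = cur_len, cur_start
--     if best_len < 2:
--         return list(tokens)
--     out = tokens[:best_start] + [''] + tokens[best_start + best_len:]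
--     if out[0] == '':
--         out.insert(0, '')
--     if out[-1] == '':
--         out.append('')
--     return out
-- ===== Notes on version B (the rewrite author's own statement) =====
-- stated objective: simpler
-- what changed: Replaces A's collect-all-runs-then-sort-then-scan (positions list, sort by start, strict-max pass, plus a shadow copy of the token list) with a single pass that tracks only the current zero-run and the best run seen so far, then splices the input list directly.
import Mathlib
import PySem

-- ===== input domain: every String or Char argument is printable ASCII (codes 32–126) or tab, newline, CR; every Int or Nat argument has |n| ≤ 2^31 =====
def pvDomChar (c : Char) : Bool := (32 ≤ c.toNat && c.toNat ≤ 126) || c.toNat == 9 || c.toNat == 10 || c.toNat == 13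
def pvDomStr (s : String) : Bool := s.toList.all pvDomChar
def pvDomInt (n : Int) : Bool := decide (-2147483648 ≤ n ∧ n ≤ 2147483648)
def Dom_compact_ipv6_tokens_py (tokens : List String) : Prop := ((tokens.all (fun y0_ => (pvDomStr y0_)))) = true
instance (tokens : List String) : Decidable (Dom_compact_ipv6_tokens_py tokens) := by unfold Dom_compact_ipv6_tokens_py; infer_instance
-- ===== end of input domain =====

-- B replaces A's collect-runs / sort / strict-max scan (and its shadow copy of the
-- token list) by a single pass tracking only the current and the best zero-run: simpler.

-- ===== PORT A =====
-- state = (new_tokens, positions, start_index, num_tokens); one step per (idx, token) of enumerate(tokens)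
def pvALoop : List (Int × String) → List String × List (Int × Int) × Option Int × Int →
    List String × List (Int × Int) × Option Int × Int
  | [], st => st
  | (idx, token) :: rest, (nt, pos, si, num) =>
    if token = "0" then
      pvALoop rest (nt ++ [token], pos,
        (match si with | none => some idx | some s => some s), num + 1)
    else
      if num > 1 then
        -- Python appends (num_tokens, start_index); start_index is an int (never None)
        -- whenever num_tokens > 1, so '.getD 0' is exact.
        pvALoop rest (nt ++ [token], pos ++ [(num, si.getD 0)], none, 0)
      else
        pvALoop rest (nt ++ [token], pos, none, 0)

def compact_ipv6_tokens_py (tokens : List String) : List String :=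
  match pvALoop (PySem.List.enumerate tokens 0) ([], [], none, 0) with
  | (new_tokens, positions, start_index, num_tokens) =>
    -- store any position not saved before loop exit
    let positions := if num_tokens > 1 then positions ++ [(num_tokens, start_index.getD 0)] else positions
    if positions.length ≠ 0 then
      let spos := PySem.List.sorted positions (fun x => x.2) false
      match spos with
      | [] => new_tokens   -- unreachable: positions is nonempty and sorted preserves length
      | p :: _ =>
        let best := spos.foldl (fun b q => if q.1 > b.1 then q else b) p
        let nt := PySem.List.slice new_tokens (some 0) (some best.2) ++ [""] ++
                  PySem.List.slice new_tokens (some (best.2 + best.1)) none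
        let nt := if PySem.List.pyGet? nt 0 = some "" then PySem.List.insert nt 0 "" else nt
        if PySem.List.pyGet? nt (-1) = some "" then nt ++ [""] else nt
    else new_tokens

-- ===== PORT B =====
-- one pass: (idx, cur_len, cur_start, best_len, best_start); returns (best_len, best_start)
def pvBScan : List String → Int → Int → Int → Int → Int → Int × Int
  | [], _, curLen, curStart, bestLen, bestStart =>
    if curLen > 1 ∧ curLen > bestLen then (curLen, curStart) else (bestLen, bestStart)
  | token :: rest, idx, curLen, curStart, bestLen, bestStart =>
    if token = "0" then
      pvBScan rest (idx + 1) (curLen + 1) (if curLen = 0 then idx else curStart) bestLen bestStart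
    else
      if curLen > 1 ∧ curLen > bestLen then
        pvBScan rest (idx + 1) 0 curStart curLen curStart
      else
        pvBScan rest (idx + 1) 0 curStart bestLen bestStart

def compact_ipv6_tokens_py_alt (tokens : List String) : List String :=
  match pvBScan tokens 0 0 0 0 0 with
  | (bestLen, bestStart) =>
    if bestLen < 2 then tokens
    else
      let out := tokens.take bestStart.toNat ++ [""] ++ tokens.drop (bestStart + bestLen).toNat
      let out := if out.head? = some "" then "" :: out else out
      if out.getLast? = some "" then out ++ [""] else out

-- ===== PRECONDITION & SPEC =====
def Spec_compact_ipv6_tokens_py (tokens : List String) (out : List String) : Prop := out = compact_ipv6_tokens_py_alt tokens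
instance (tokens : List String) (out : List String) : Decidable (Spec_compact_ipv6_tokens_py tokens out) := by unfold Spec_compact_ipv6_tokens_py; infer_instance

-- ===== CLAIM (what is proved, stated in full; the proofs are below) =====
def Claim_equal_compact_ipv6_tokens_py : Prop := ∀ (tokens : List String), Dom_compact_ipv6_tokens_py tokens → Spec_compact_ipv6_tokens_py tokens (compact_ipv6_tokens_py tokens)

-- ===== LEMMAS AND PROOFS =====

-- the list of maximal zero-runs (length > 1) of l, as (length, start) pairs
def pvRuns : List String → Int → Int → Int → List (Int × Int)
  | [], _, len, start => if len > 1 then [(len, start)] else []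
  | token :: rest, idx, len, start =>
    if token = "0" then
      pvRuns rest (idx + 1) (len + 1) (if len = 0 then idx else start)
    else
      (if len > 1 then [(len, start)] else []) ++ pvRuns rest (idx + 1) 0 start

def pvPick (b : Int × Int) (l : List (Int × Int)) : Int × Int :=
  l.foldl (fun b q => if q.1 > b.1 then q else b) b

-- the loop state after the post-loop "store any position not saved": (new_tokens, positions)
def pvFinish (st : List String × List (Int × Int) × Option Int × Int) :
    List String × List (Int × Int) :=
  (st.1, st.2.1 ++ (if st.2.2.2 > 1 then [(st.2.2.2, st.2.2.1.getD 0)] else []))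

theorem pvALoop_runs (l : List String) : ∀ (idx : Int) (nt : List String)
    (pos : List (Int × Int)) (len start : Int), 0 ≤ len →
    pvFinish (pvALoop (PySem.List.enumerate l idx)
        (nt, pos, (if len = 0 then none else some start), len))
    = (nt ++ l, pos ++ pvRuns l idx len start) := by
  induction l with
  | nil =>
    intro idx nt pos len start h
    simp only [PySem.List.enumerate_nil, pvALoop, pvRuns, pvFinish]
    split_ifs with h1 h2 <;> simp_all
  | cons t rest ih =>
    intro idx nt pos len start h
    rw [PySem.List.enumerate_cons]
    by_cases ht : t = "0"
    · rw [ht]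
      have hne : ¬ (len + 1 = 0) := by omega
      simp only [pvALoop, pvRuns, reduceIte]
      have hsi : (match (if len = 0 then none else some start) with
          | none => some idx | some s => some s) =
          (if len + 1 = 0 then none else some (if len = 0 then idx else start)) := by
        split_ifs with h0 <;> simp_all
      rw [hsi, ih (idx + 1) (nt ++ ["0"]) pos (len + 1) (if len = 0 then idx else start) (by omega)]
      simp
    · by_cases hl : len > 1
      · have h0 : ¬ (len = 0) := by omega
        simp only [pvALoop, pvRuns, if_neg ht, if_pos hl, if_neg h0, Option.getD_some]
        have := ih (idx + 1) (nt ++ [t]) (pos ++ [(len, start)]) 0 start (by omega)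
        rw [if_pos rfl] at this
        rw [this]
        simp
      · simp only [pvALoop, pvRuns, if_neg ht, if_neg hl]
        have := ih (idx + 1) (nt ++ [t]) pos 0 start (by omega)
        rw [if_pos rfl] at this
        rw [this]
        simp

theorem pvBScan_pick (l : List String) : ∀ (idx len start bl bs : Int),
    pvBScan l idx len start bl bs = pvPick (bl, bs) (pvRuns l idx len start) := by
  induction l with
  | nil =>
    intro idx len start bl bs
    simp only [pvBScan, pvRuns, pvPick]
    split_ifs with h1 h2 h3 <;> simp_all [List.foldl]
  | cons t rest ih =>
    intro idx len start bl bs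
    by_cases ht : t = "0"
    · rw [ht]
      simp only [pvBScan, pvRuns, reduceIte]
      exact ih _ _ _ _ _
    · simp only [pvBScan, pvRuns, if_neg ht]
      by_cases hl : len > 1
      · by_cases hb : len > bl
        · rw [if_pos ⟨hl, hb⟩, ih, if_pos hl]
          simp [pvPick, hb]
        · rw [if_neg (by tauto), ih, if_pos hl]
          simp [pvPick, hb]
      · rw [if_neg (by tauto), ih, if_neg hl]
        simp [pvPick]

theorem pvRuns_fst_gt_one (l : List String) : ∀ (idx len start : Int),
    ∀ p ∈ pvRuns l idx len start, 1 < p.1 := by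
  induction l with
  | nil =>
    intro idx len start p hp
    simp only [pvRuns] at hp
    split_ifs at hp with h <;> simp_all
  | cons t rest ih =>
    intro idx len start p hp
    by_cases ht : t = "0"
    · simp only [pvRuns, if_pos ht] at hp
      exact ih _ _ _ p hp
    · simp only [pvRuns, if_neg ht] at hp
      rcases List.mem_append.1 hp with hm | hm
      · split_ifs at hm with h2
        · simp_all
        · simp at hm
      · exact ih _ _ _ p hm

theorem pvRuns_snd_lb (l : List String) : ∀ (idx len start : Int), 0 ≤ len →
    (0 < len → start ≤ idx) →
    ∀ p ∈ pvRuns l idx len start, (if len = 0 then idx else start) ≤ p.2 := by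
  induction l with
  | nil =>
    intro idx len start h0 h p hp
    simp only [pvRuns] at hp
    split_ifs at hp with h1
    · simp only [List.mem_singleton] at hp
      subst hp
      rw [if_neg (by omega : ¬ (len = 0))]
    · simp at hp
  | cons t rest ih =>
    intro idx len start h0 h p hp
    by_cases ht : t = "0"
    · simp only [pvRuns, if_pos ht] at hp
      have hb : (if len = 0 then idx else start) ≤ idx := by
        split_ifs with hz
        · omega
        · exact h (by omega)
      have := ih (idx + 1) (len + 1) (if len = 0 then idx else start) (by omega)
        (fun _ => by omega) p hp
      rw [if_neg (by omega : ¬ (len + 1 = 0))] at this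
      exact this
    · simp only [pvRuns, if_neg ht] at hp
      rcases List.mem_append.1 hp with hm | hm
      · split_ifs at hm with h2
        · simp only [List.mem_singleton] at hm
          subst hm
          rw [if_neg (by omega : ¬ (len = 0))]
        · simp at hm
      · have := ih (idx + 1) 0 start (by omega) (by omega) p hm
        rw [if_pos rfl] at this
        have hb : (if len = 0 then idx else start) ≤ idx := by
          split_ifs with hz
          · omega
          · exact h (by omega)
        omega

theorem pvRuns_sorted (l : List String) : ∀ (idx len start : Int),
    (0 < len → start + len = idx) → 0 ≤ len →
    (pvRuns l idx len start).Pairwise (fun a b => a.2 < b.2) := by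
  induction l with
  | nil =>
    intro idx len start h h0
    simp only [pvRuns]
    split_ifs <;> simp
  | cons t rest ih =>
    intro idx len start h h0
    by_cases ht : t = "0"
    · simp only [pvRuns, if_pos ht]
      exact ih (idx + 1) (len + 1) (if len = 0 then idx else start)
        (fun _ => by split_ifs with hz <;> omega) (by omega)
    · simp only [pvRuns, if_neg ht]
      refine List.pairwise_append.2 ⟨?_, ih (idx + 1) 0 start (by omega) (by omega), ?_⟩
      · split_ifs <;> simp
      · intro a ha b hb
        split_ifs at ha with h2
        · simp only [List.mem_singleton] at ha
          subst ha
          have hstart : start + len = idx := h (by omega)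
          have := pvRuns_snd_lb rest (idx + 1) 0 start (by omega) (by omega) b hb
          rw [if_pos rfl] at this
          simp only []
          omega
        · simp at ha

theorem pvPick_fst_le (l : List (Int × Int)) : ∀ (b : Int × Int), b.1 ≤ (pvPick b l).1 := by
  induction l with
  | nil => intro b; simp [pvPick]
  | cons q rest ih =>
    intro b
    simp only [pvPick, List.foldl_cons]
    by_cases h : q.1 > b.1
    · rw [if_pos h]
      exact le_trans (le_of_lt h) (ih q)
    · rw [if_neg h]
      exact ih b

theorem pvPick_mem (l : List (Int × Int)) : ∀ (b : Int × Int), pvPick b l = b ∨ pvPick b l ∈ l := by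
  induction l with
  | nil => intro b; simp [pvPick]
  | cons q rest ih =>
    intro b
    simp only [pvPick, List.foldl_cons]
    by_cases h : q.1 > b.1
    · rw [if_pos h]
      rcases ih q with h' | h'
      · right; rw [show rest.foldl (fun b q => if q.1 > b.1 then q else b) q = pvPick q rest from rfl, h']; simp
      · right; exact List.mem_cons_of_mem _ h'
    · rw [if_neg h]
      rcases ih b with h' | h'
      · left; exact h'
      · right; exact List.mem_cons_of_mem _ h'

-- ===== VERDICT (by name: the statement is the Claim_ definition above) =====
theorem compact_ipv6_tokens_py_spec : Claim_equal_compact_ipv6_tokens_py := by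
  intro tokens _
  unfold Spec_compact_ipv6_tokens_py compact_ipv6_tokens_py compact_ipv6_tokens_py_alt
  rw [pvBScan_pick]
  have hA := pvALoop_runs tokens 0 [] [] 0 0 le_rfl
  rw [if_pos rfl] at hA
  rcases hst : pvALoop (PySem.List.enumerate tokens 0) ([], [], none, 0) with ⟨nt, pos, si, num⟩
  rw [hst] at hA
  unfold pvFinish at hA
  simp only [List.nil_append] at hA
  rw [Prod.mk.injEq] at hA
  obtain ⟨hnt, hpos⟩ := hA
  dsimp only
  have hmerge : (if num > 1 then pos ++ [(num, si.getD 0)] else pos)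
      = pos ++ (if num > 1 then [(num, si.getD 0)] else []) := by
    split_ifs <;> simp
  rw [hmerge, hpos, hnt]
  rcases hP : pvRuns tokens 0 0 0 with _ | ⟨p, ps⟩
  · simp [pvPick]
  · have hp1 : 1 < p.1 := pvRuns_fst_gt_one tokens 0 0 0 p (by rw [hP]; simp)
    have hsort : PySem.List.sorted (p :: ps) (fun x => x.2) false = p :: ps :=
      PySem.List.sorted_eq_of_perm_of_pairwise_lt (p :: ps) (p :: ps) (fun x => x.2)
        (List.Perm.refl _) (hP ▸ pvRuns_sorted tokens 0 0 0 (by omega) le_rfl)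
    have hbpick : pvPick (0, 0) (p :: ps) = pvPick p ps := by
      simp only [pvPick, List.foldl_cons]
      rw [if_pos (by omega : p.1 > ((0 : Int), (0 : Int)).1)]
    have hfold : (p :: ps).foldl (fun b q => if q.1 > b.1 then q else b) p = pvPick p ps := by
      simp [pvPick, List.foldl_cons]
    rcases hbest : pvPick p ps with ⟨L, S⟩
    have hL : 1 < L := by
      have := pvPick_fst_le ps p
      rw [hbest] at this
      simp only at this
      omega
    have hmem : (L, S) ∈ pvRuns tokens 0 0 0 := by
      rw [hP]
      rcases pvPick_mem ps p with h | h
      · rw [← hbest, h]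
        exact List.mem_cons_self
      · exact List.mem_cons_of_mem _ (hbest ▸ h)
    have hS : 0 ≤ S := by
      have := pvRuns_snd_lb tokens 0 0 0 le_rfl (by omega) (L, S) hmem
      simpa using this
    rw [hsort]
    dsimp only
    rw [hfold, hbest, hbpick, hbest]
    rw [if_pos (by simp : (p :: ps).length ≠ 0)]
    dsimp only
    rw [PySem.List.slice_zero_start, PySem.List.slice_to tokens (by omega : (0 : Int) ≤ S),
      PySem.List.slice_from tokens (by omega : (0 : Int) ≤ S + L)]
    rw [if_neg (by omega : ¬ L < 2)]
    rw [PySem.List.insert_zero, PySem.List.pyGet?_zero, PySem.List.pyGet?_neg_one,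
      List.head?_eq_getElem?]
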